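-- pv_equiv track=rewrite | github.com/ydb-platform/ydb | contrib/python/fastapi-pagination/fastapi_pagination/ext/utils.py | get_mongo_pipeline_filter_end
-- ===== SOURCE A (Python) =====
-- from typing import Any, Protocol, TypeVar, cast
--
-- def get_mongo_pipeline_filter_end(
--     aggregate_pipeline: list[dict[str, Any]],
-- ) -> int:
--     """
--     Get the index of the stage in the aggregation pipeline where the number or order
--     of documents in the pipeline no longer changes.
--     """
--
--     # MongoDB aggregation pipeline stages that do not change the number or order
--     # of documents in the pipeline output.
--     transform_stages = [
--         "$addFields",
--         "$graphLookup",
--         "$lookup",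
--         "$project",
--         "$replaceRoot",
--         "$replaceWith",
--         "$set",
--         "$unset",
--     ]
--     for i, stage in enumerate(reversed(aggregate_pipeline)):
--         if any(stage_name not in transform_stages for stage_name in stage):
--             return len(aggregate_pipeline) - i
--     return 0
-- ===== SOURCE B (Python) =====
-- def get_mongo_pipeline_filter_end(aggregate_pipeline):
--     transform_stages = [
--         "$addFields",
--         "$graphLookup",
--         "$lookup",
--         "$project",
--         "$replaceRoot",
--         "$replaceWith",
--         "$set",
--         "$unset",
--     ]
--     end = 0
--     for i, stage in enumerate(aggregate_pipeline):
--         if any(stage_name not in transform_stages for stage_name in stage):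
--             end = i + 1
--     return end
-- ===== Notes on version B (the rewrite author's own statement) =====
-- stated objective: alternative
-- what changed: B scans the pipeline forward with a last-write-wins accumulator and no early return, instead of A's reversed scan with an early return and len-i index arithmetic.
import Mathlib
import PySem

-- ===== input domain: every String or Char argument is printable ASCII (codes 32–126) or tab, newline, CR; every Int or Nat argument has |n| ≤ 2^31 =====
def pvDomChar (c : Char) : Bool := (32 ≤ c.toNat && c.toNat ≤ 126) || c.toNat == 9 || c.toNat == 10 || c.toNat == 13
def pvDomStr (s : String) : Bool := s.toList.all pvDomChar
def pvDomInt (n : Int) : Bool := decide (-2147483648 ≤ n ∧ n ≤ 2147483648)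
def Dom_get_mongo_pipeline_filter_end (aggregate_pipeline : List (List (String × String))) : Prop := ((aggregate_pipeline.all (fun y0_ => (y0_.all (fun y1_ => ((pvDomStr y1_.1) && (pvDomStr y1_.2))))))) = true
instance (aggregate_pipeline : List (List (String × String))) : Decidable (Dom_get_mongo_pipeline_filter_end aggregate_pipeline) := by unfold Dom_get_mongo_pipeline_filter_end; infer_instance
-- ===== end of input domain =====

-- B scans the pipeline forward with a last-write-wins accumulator and no early return,
-- instead of A's reversed scan with an early return and len-i index arithmetic (alternative; same cost).

-- ===== PORT A =====
def pvTransformStages : List String :=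
  ["$addFields", "$graphLookup", "$lookup", "$project",
   "$replaceRoot", "$replaceWith", "$set", "$unset"]

-- the reversed-enumerate loop of A: i counts up, first stage with a non-transform key returns n - i
def pvGoA (n : Int) (i : Int) : List (List (String × String)) → Int
  | [] => 0
  | stage :: rest =>
      if stage.any (fun kv => !(pvTransformStages.contains kv.1)) then n - i
      else pvGoA n (i + 1) rest

def get_mongo_pipeline_filter_end (aggregate_pipeline : List (List (String × String))) : Int :=
  pvGoA (aggregate_pipeline.length : Int) 0 aggregate_pipeline.reverse

-- ===== PORT B =====
def get_mongo_pipeline_filter_end_alt (aggregate_pipeline : List (List (String × String))) : Int :=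
  (PySem.List.enumerate aggregate_pipeline 0).foldl
    (fun acc p =>
      if p.2.any (fun kv => !(pvTransformStages.contains kv.1)) then p.1 + 1 else acc) 0

-- ===== PRECONDITION & SPEC =====
def Spec_get_mongo_pipeline_filter_end (aggregate_pipeline : List (List (String × String))) (out : Int) : Prop := out = get_mongo_pipeline_filter_end_alt aggregate_pipeline
instance (aggregate_pipeline : List (List (String × String))) (out : Int) : Decidable (Spec_get_mongo_pipeline_filter_end aggregate_pipeline out) := by unfold Spec_get_mongo_pipeline_filter_end; infer_instance

-- ===== CLAIM (what is proved, stated in full; the proofs are below) =====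
def Claim_equal_get_mongo_pipeline_filter_end : Prop := ∀ (aggregate_pipeline : List (List (String × String))), Dom_get_mongo_pipeline_filter_end aggregate_pipeline → Spec_get_mongo_pipeline_filter_end aggregate_pipeline (get_mongo_pipeline_filter_end aggregate_pipeline)

-- ===== LEMMAS AND PROOFS =====

-- the starting index of A's loop only shifts the returned value's offset
theorem pvGoA_shift (ys : List (List (String × String))) (n i : Int) :
    pvGoA n i ys = pvGoA (n - i) 0 ys := by
  induction ys generalizing n i with
  | nil => rfl
  | cons s rest ih =>
      simp only [pvGoA]
      split
      · omega
      · rw [ih n (i + 1), ih (n - i) (0 + 1)]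
        congr 1
        omega

theorem portA_snoc (xs : List (List (String × String))) (x : List (String × String)) :
    get_mongo_pipeline_filter_end (xs ++ [x]) =
      if x.any (fun kv => !(pvTransformStages.contains kv.1)) then (xs.length : Int) + 1
      else get_mongo_pipeline_filter_end xs := by
  unfold get_mongo_pipeline_filter_end
  rw [List.reverse_append]
  simp only [List.reverse_singleton, List.singleton_append, List.length_append,
    List.length_singleton, pvGoA]
  split
  · push_cast; ring
  · rw [pvGoA_shift]
    congr 1
    push_cast
    ring

theorem portB_snoc (xs : List (List (String × String))) (x : List (String × String)) :
    get_mongo_pipeline_filter_end_alt (xs ++ [x]) =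
      if x.any (fun kv => !(pvTransformStages.contains kv.1)) then (xs.length : Int) + 1
      else get_mongo_pipeline_filter_end_alt xs := by
  unfold get_mongo_pipeline_filter_end_alt
  rw [PySem.List.enumerate_append, List.foldl_append]
  simp [PySem.List.enumerate]

theorem ports_agree (xs : List (List (String × String))) :
    get_mongo_pipeline_filter_end xs = get_mongo_pipeline_filter_end_alt xs := by
  induction xs using List.reverseRecOn with
  | nil => rfl
  | append_singleton xs x ih =>
      rw [portA_snoc, portB_snoc, ih]

-- ===== VERDICT (by name: the statement is the Claim_ definition above) =====
theorem get_mongo_pipeline_filter_end_spec : Claim_equal_get_mongo_pipeline_filter_end := by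
  intro xs _
  unfold Spec_get_mongo_pipeline_filter_end
  exact ports_agree xs
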